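-- pv_equiv track=rewrite | github.com/ben-xy/qa_agent_legal_tax | scripts/eval/chunk_eval/eval_chunking_compare.py | union_metric_names
-- ===== SOURCE A (Python) =====
-- from typing import Dict, Any, List, Tuple
--
-- def union_metric_names(a: Dict[str, float], b: Dict[str, float]) -> List[str]:
--     names = sorted(set(a.keys()) | set(b.keys()))
--     # Put common report metrics first
--     priority = [
--         "retrieval.recall@5",
--         "retrieval.precision@5",
--         "retrieval.ndcg@5",
--         "retrieval.mrr@5",
--         "retrieval.map@5",
--         "generation.exact_match",
--         "generation.token_f1",
--         "generation.rougeL_f1",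
--         "generation.citation_hit_rate",
--     ]
--     priority_set = set(priority)
--     ordered = [x for x in priority if x in names]
--     ordered += [x for x in names if x not in priority_set]
--     return ordered
-- ===== SOURCE B (Python) =====
-- from typing import Dict, List
--
-- def union_metric_names(a: Dict[str, float], b: Dict[str, float]) -> List[str]:
--     priority = [
--         "retrieval.recall@5",
--         "retrieval.precision@5",
--         "retrieval.ndcg@5",
--         "retrieval.mrr@5",
--         "retrieval.map@5",
--         "generation.exact_match",
--         "generation.token_f1",
--         "generation.rougeL_f1",
--         "generation.citation_hit_rate",
--     ]
--     rank = {name: i for i, name in enumerate(priority)}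
--     return sorted(set(a.keys()) | set(b.keys()),
--                   key=lambda x: (rank.get(x, len(priority)), x))
-- ===== Notes on version B (the rewrite author's own statement) =====
-- stated objective: idiomatic
-- what changed: A sorts the whole key union and then makes two partition passes (priority filter, then non-priority filter); B builds a rank dict from the priority list and produces the order in one sort of the union under the composite key (rank.get(x, len(priority)), x).
import Mathlib
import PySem

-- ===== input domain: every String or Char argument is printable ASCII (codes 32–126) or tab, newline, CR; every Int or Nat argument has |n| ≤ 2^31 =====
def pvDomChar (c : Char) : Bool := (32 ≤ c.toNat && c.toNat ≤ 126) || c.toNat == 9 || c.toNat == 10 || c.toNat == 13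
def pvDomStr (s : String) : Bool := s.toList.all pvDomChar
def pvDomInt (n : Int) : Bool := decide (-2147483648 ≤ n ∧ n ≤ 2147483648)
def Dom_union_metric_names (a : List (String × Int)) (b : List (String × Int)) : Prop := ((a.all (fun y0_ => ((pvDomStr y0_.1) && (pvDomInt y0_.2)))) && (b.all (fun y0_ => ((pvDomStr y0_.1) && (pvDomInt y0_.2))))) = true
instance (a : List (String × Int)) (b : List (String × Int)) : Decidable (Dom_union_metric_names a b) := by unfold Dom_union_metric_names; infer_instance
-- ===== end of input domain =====

-- B replaces A's sort-then-two-partition-passes by a single sort under a composite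
-- (rank, name) key (idiomatic rewrite; same return value, no speed claim).

-- The literal priority list both Python versions contain.
def pvPriority : List String := [
  "retrieval.recall@5",
  "retrieval.precision@5",
  "retrieval.ndcg@5",
  "retrieval.mrr@5",
  "retrieval.map@5",
  "generation.exact_match",
  "generation.token_f1",
  "generation.rougeL_f1",
  "generation.citation_hit_rate"]

-- ===== PORT A =====
def union_metric_names (a : List (String × Int)) (b : List (String × Int)) : List String :=
  let names := PySem.List.sorted
    (PySem.Set.union (PySem.Set.ofList (a.map Prod.fst)) (PySem.Set.ofList (b.map Prod.fst)))
    (fun x => x) false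
  let priority := pvPriority
  let prioritySet := PySem.Set.ofList priority
  let ordered := priority.filter (fun x => names.contains x)
  ordered ++ names.filter (fun x => !(prioritySet.contains x))

-- ===== PORT B =====
-- rank = {name: i for i, name in enumerate(priority)}
def pvRank : PySem.Dict String Int :=
  (PySem.List.enumerate pvPriority).foldl (fun d p => d.insert p.2 p.1) PySem.Dict.empty

def union_metric_names_alt (a : List (String × Int)) (b : List (String × Int)) : List String :=
  PySem.List.sorted2
    (PySem.Set.union (PySem.Set.ofList (a.map Prod.fst)) (PySem.Set.ofList (b.map Prod.fst)))
    (fun x => PySem.Dict.getD pvRank x (pvPriority.length : Int)) (fun x => x) false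

-- ===== PRECONDITION & SPEC =====
def Spec_union_metric_names (a : List (String × Int)) (b : List (String × Int)) (out : List String) : Prop := out = union_metric_names_alt a b
instance (a : List (String × Int)) (b : List (String × Int)) (out : List String) : Decidable (Spec_union_metric_names a b out) := by unfold Spec_union_metric_names; infer_instance

-- ===== CLAIM (what is proved, stated in full; the proofs are below) =====
def Claim_equal_union_metric_names : Prop := ∀ (a : List (String × Int)) (b : List (String × Int)), Dom_union_metric_names a b → Spec_union_metric_names a b (union_metric_names a b)

-- ===== LEMMAS AND PROOFS =====

theorem pv_lex_lt_left {a b : Int} {x y : String} (h : a < b) :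
    toLex (a, x) < toLex (b, y) := Prod.Lex.lt_iff.mpr (Or.inl h)

theorem pv_lex_lt_right {a b : Int} {x y : String} (h : a = b) (h2 : x < y) :
    toLex (a, x) < toLex (b, y) := Prod.Lex.lt_iff.mpr (Or.inr ⟨h, h2⟩)

-- sorted(xs, key=lambda x: (k1(x), k2(x))) is a sort under the lexicographic key
theorem pv_sorted2_eq_sorted_lex {α κ₁ κ₂ : Type} [LinearOrder κ₁] [LinearOrder κ₂]
    (xs : List α) (k1 : α → κ₁) (k2 : α → κ₂) :
    PySem.List.sorted2 xs k1 k2 false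
      = PySem.List.sorted xs (fun x => toLex (k1 x, k2 x)) false := by
  rw [PySem.List.sorted_eq_foldl_insertBy]
  have hbefore : (fun a b => decide (k1 a < k1 b) || (!decide (k1 b < k1 a) && decide (k2 a < k2 b)))
      = (fun a b => decide (toLex (k1 a, k2 a) < toLex (k1 b, k2 b))) := by
    funext p q
    by_cases h1 : k1 p < k1 q
    · simp [h1, Prod.Lex.lt_iff]
    · by_cases h2 : k1 q < k1 p
      · simp [h1, h2, Prod.Lex.lt_iff, ne_of_gt h2]
      · have he : k1 p = k1 q := le_antisymm (not_lt.mp h2) (not_lt.mp h1)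
        simp [he, Prod.Lex.lt_iff]
  show List.foldl (fun acc x => PySem.List.insertBy
      (fun a b => decide (k1 a < k1 b) || (!decide (k1 b < k1 a) && decide (k2 a < k2 b))) x acc) [] xs = _
  rw [hbefore]

theorem pvRank_getD_of_not_mem (x : String) (hx : x ∉ pvPriority) :
    PySem.Dict.getD pvRank x (pvPriority.length : Int) = (pvPriority.length : Int) := by
  simp only [pvPriority, List.mem_cons, List.not_mem_nil, or_false, not_or] at hx
  obtain ⟨h1, h2, h3, h4, h5, h6, h7, h8, h9⟩ := hx
  have hb1 : ("retrieval.recall@5" == x) = false := by simp [Ne.symm h1]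
  have hb2 : ("retrieval.precision@5" == x) = false := by simp [Ne.symm h2]
  have hb3 : ("retrieval.ndcg@5" == x) = false := by simp [Ne.symm h3]
  have hb4 : ("retrieval.mrr@5" == x) = false := by simp [Ne.symm h4]
  have hb5 : ("retrieval.map@5" == x) = false := by simp [Ne.symm h5]
  have hb6 : ("generation.exact_match" == x) = false := by simp [Ne.symm h6]
  have hb7 : ("generation.token_f1" == x) = false := by simp [Ne.symm h7]
  have hb8 : ("generation.rougeL_f1" == x) = false := by simp [Ne.symm h8]
  have hb9 : ("generation.citation_hit_rate" == x) = false := by simp [Ne.symm h9]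
  simp [pvRank, pvPriority, PySem.Dict.getD, PySem.Dict.get?, PySem.Dict.insert,
    PySem.Dict.empty, PySem.Dict.contains, PySem.List.enumerate, List.find?,
    hb1, hb2, hb3, hb4, hb5, hb6, hb7, hb8, hb9]

theorem pvRank_getD_lt_of_mem (x : String) (hx : x ∈ pvPriority) :
    PySem.Dict.getD pvRank x (pvPriority.length : Int) < (pvPriority.length : Int) := by
  simp only [pvPriority, List.mem_cons, List.not_mem_nil, or_false] at hx
  rcases hx with rfl | rfl | rfl | rfl | rfl | rfl | rfl | rfl | rfl <;> decide

theorem pvPriority_pairwise_rank :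
    pvPriority.Pairwise (fun p q =>
      PySem.Dict.getD pvRank p (pvPriority.length : Int)
        < PySem.Dict.getD pvRank q (pvPriority.length : Int)) := by decide

-- ===== VERDICT (by name: the statement is the Claim_ definition above) =====
theorem union_metric_names_spec : Claim_equal_union_metric_names := by
  intro a b _
  unfold Spec_union_metric_names union_metric_names union_metric_names_alt
  set u := PySem.Set.union (PySem.Set.ofList (a.map Prod.fst)) (PySem.Set.ofList (b.map Prod.fst)) with hu
  set names := PySem.List.sorted u (fun x => x) false with hnames
  set L := pvPriority.filter (fun x => names.contains x)
      ++ names.filter (fun x => !((PySem.Set.ofList pvPriority).contains x)) with hL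
  have hU : u.Nodup := PySem.Set.nodup_union _ _ (PySem.Set.nodup_ofList _)
  have hperm : names.Perm u := PySem.List.sorted_perm u (fun x => x) false
  have hNnd : names.Nodup := hperm.symm.nodup hU
  have hstrict : names.Pairwise (· < ·) := by
    have h1 := PySem.List.sorted_pairwise u (fun x => x)
    exact ((h1.and hNnd).imp (fun h => lt_of_le_of_ne h.1 h.2))
  have hPnd : pvPriority.Nodup := by decide
  -- membership in the two filters
  have hmem1 : ∀ x ∈ pvPriority.filter (fun x => names.contains x), x ∈ pvPriority ∧ x ∈ names := by
    intro x hx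
    simpa using List.mem_filter.mp hx
  have hmem2 : ∀ x ∈ names.filter (fun x => !((PySem.Set.ofList pvPriority).contains x)),
      x ∈ names ∧ x ∉ pvPriority := by
    intro x hx
    have := List.mem_filter.mp hx
    simpa [PySem.Set.mem_ofList] using this
  have hLnd : L.Nodup := by
    rw [hL, List.nodup_append]
    refine ⟨hPnd.filter _, hNnd.filter _, ?_⟩
    intro x hx y hy
    rintro rfl
    exact (hmem2 x hy).2 (hmem1 x hx).1
  have hLperm : L.Perm u := by
    rw [List.perm_ext_iff_of_nodup hLnd hU]
    intro x
    constructor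
    · intro hx
      rcases List.mem_append.mp hx with h | h
      · exact hperm.mem_iff.mp (hmem1 x h).2
      · exact hperm.mem_iff.mp (hmem2 x h).1
    · intro hx
      have hn : x ∈ names := hperm.mem_iff.mpr hx
      by_cases hp : x ∈ pvPriority
      · exact List.mem_append.mpr (Or.inl (List.mem_filter.mpr ⟨hp, by simpa using hn⟩))
      · exact List.mem_append.mpr (Or.inr (List.mem_filter.mpr ⟨hn, by simpa [PySem.Set.mem_ofList] using hp⟩))
  have hLpair : L.Pairwise (fun p q =>
      toLex (PySem.Dict.getD pvRank p (pvPriority.length : Int), p)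
        < toLex (PySem.Dict.getD pvRank q (pvPriority.length : Int), q)) := by
    rw [hL, List.pairwise_append]
    refine ⟨?_, ?_, ?_⟩
    · exact (List.Pairwise.sublist (List.filter_sublist) pvPriority_pairwise_rank).imp
        (fun h => pv_lex_lt_left h)
    · have hbase : (names.filter (fun x => !((PySem.Set.ofList pvPriority).contains x))).Pairwise (· < ·) :=
        List.Pairwise.sublist (List.filter_sublist) hstrict
      refine List.Pairwise.imp_of_mem ?_ hbase
      intro p q hp hq hlt
      exact pv_lex_lt_right (by rw [pvRank_getD_of_not_mem p (hmem2 p hp).2,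
        pvRank_getD_of_not_mem q (hmem2 q hq).2]) hlt
    · intro p hp q hq
      apply pv_lex_lt_left
      have h1 := pvRank_getD_lt_of_mem p (hmem1 p hp).1
      have h2 := pvRank_getD_of_not_mem q (hmem2 q hq).2
      omega
  rw [pv_sorted2_eq_sorted_lex]
  exact (PySem.List.sorted_eq_of_perm_of_pairwise_lt u L
    (fun x => toLex (PySem.Dict.getD pvRank x (pvPriority.length : Int), x)) hLperm hLpair).symm
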